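-- pv_equiv track=rewrite | github.com/PreferredAI/PyBMF | utils/collective_utils.py | get_matrices
-- ===== SOURCE A (Python) =====
-- def get_factor_list(factors):
--     """Get sorted factor list.
--
--     Parameters
--     ----------
--     factors : list of int list
--         List of factor id pairs, indicating the row and column factors of each matrix.
--         Please follow the convention that factors are numbered consecutively and starting from 0.
--         There must exist a matrix with its factors numbered as [0, 1].
--
--     Returns
--     -------
--     factor_list : list
--         List of sorted factor ids.
--     """
--     factor_list = []
--     for f in factors:
--         factor_list.extend(f)
--     factor_list = sorted(list(set(factor_list)))
--     return factor_list
--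
-- def get_matrices(factors):
--     '''List of related matrices given factors.
--
--     This is the reversion of 'factors', the list of related factors given matrices.
--     '''
--     factor_list = get_factor_list(factors)
--     matrices = []
--
--     for f in factor_list:
--         matrix_list = []
--         for i, fs in enumerate(factors):
--             if f in fs:
--                 matrix_list.append(i)
--         matrices.append(matrix_list)
--     return matrices
-- ===== SOURCE B (Python) =====
-- def get_matrices(factors):
--     '''List of related matrices given factors.
--
--     Inverted-index re-implementation: one pass over enumerate(factors) builds a
--     factor -> matrix-indices dict, then emit buckets in sorted-factor order.
--     '''
--     buckets = {}
--     for i, fs in enumerate(factors):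
--         for f in set(fs):
--             buckets[f] = buckets.get(f, []) + [i]
--     return [buckets[f] for f in sorted(buckets)]
-- ===== Notes on version B (the rewrite author's own statement) =====
-- stated objective: faster
-- what changed: Replaces A's per-factor rescan of all matrices (collect+sort factors, then for each factor a membership scan over every matrix pair) with a single inverted-index pass over enumerate(factors) building a factor->matrix-indices dict, emitted in sorted-key order.
import Mathlib
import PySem

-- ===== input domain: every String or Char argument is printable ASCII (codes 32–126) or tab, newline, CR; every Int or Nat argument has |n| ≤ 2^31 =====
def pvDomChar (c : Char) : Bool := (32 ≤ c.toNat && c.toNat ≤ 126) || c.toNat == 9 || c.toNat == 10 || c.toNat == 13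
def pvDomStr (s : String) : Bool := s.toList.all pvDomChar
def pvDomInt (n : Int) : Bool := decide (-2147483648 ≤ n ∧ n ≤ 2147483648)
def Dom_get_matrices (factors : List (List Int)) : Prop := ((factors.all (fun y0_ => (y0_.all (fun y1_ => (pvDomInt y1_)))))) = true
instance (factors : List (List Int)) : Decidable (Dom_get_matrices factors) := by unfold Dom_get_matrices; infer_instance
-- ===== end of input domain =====

-- B replaces A's per-factor scan of all matrices by one inverted-index pass over
-- enumerate(factors) (factor -> matrix indices dict), emitted in sorted-factor order.


-- ===== PORT A =====
def get_factor_list (factors : List (List Int)) : List Int :=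
  -- factor_list = []; for f in factors: factor_list.extend(f); sorted(list(set(factor_list)))
  let factor_list := factors.foldl (fun acc f => acc ++ f) []
  PySem.List.sorted (PySem.Set.ofList factor_list) (fun x => x) false

def get_matrices (factors : List (List Int)) : List (List Int) :=
  let factor_list := get_factor_list factors
  -- for f in factor_list: matrix_list = []; for i, fs in enumerate(factors): if f in fs: append i
  factor_list.foldl (fun matrices f =>
    matrices ++ [(PySem.List.enumerate factors 0).foldl
      (fun ml p => if f ∈ p.2 then ml ++ [p.1] else ml) []]) []

-- ===== PORT B =====
def get_matrices_alt (factors : List (List Int)) : List (List Int) :=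
  -- buckets = {}; for i, fs in enumerate(factors): for f in set(fs): buckets[f] = buckets.get(f, []) + [i]
  let buckets := (PySem.List.enumerate factors 0).foldl
    (fun d p => (PySem.Set.ofList p.2).foldl
      (fun d f => d.modify f [] (· ++ [p.1])) d)
    PySem.Dict.empty
  -- [buckets[f] for f in sorted(buckets)]  (every f ranged over is a key, so buckets[f] = buckets.get(f, []))
  (PySem.List.sorted (PySem.Dict.keys buckets) (fun x => x) false).map
    (fun f => buckets.getD f [])

-- ===== PRECONDITION & SPEC =====
def Spec_get_matrices (factors : List (List Int)) (out : List (List Int)) : Prop := out = get_matrices_alt factors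
instance (factors : List (List Int)) (out : List (List Int)) : Decidable (Spec_get_matrices factors out) := by unfold Spec_get_matrices; infer_instance

-- ===== CLAIM (what is proved, stated in full; the proofs are below) =====
def Claim_equal_get_matrices : Prop := ∀ (factors : List (List Int)), Dom_get_matrices factors → Spec_get_matrices factors (get_matrices factors)

-- ===== LEMMAS AND PROOFS =====

-- the (factor, matrix-index) pairs B's double loop walks, flattened
def pvPairs (factors : List (List Int)) : List (Int × Int) :=
  (PySem.List.enumerate factors 0).flatMap
    (fun p => (PySem.Set.ofList p.2).map (fun f => (f, p.1)))

theorem pv_buckets_eq (factors : List (List Int)) :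
    (PySem.List.enumerate factors 0).foldl
      (fun d p => (PySem.Set.ofList p.2).foldl
        (fun d f => d.modify f [] (· ++ [p.1])) d)
      PySem.Dict.empty
    = (pvPairs factors).foldl (fun d q => d.modify q.1 [] (· ++ [q.2])) PySem.Dict.empty := by
  rw [pvPairs, List.foldl_flatMap]
  simp [List.foldl_map]

-- on a duplicate-free list, filtering by equality with f keeps at most the one f
theorem pv_filter_beq_of_nodup (s : List Int) (hs : s.Nodup) (f : Int) :
    s.filter (fun x => x == f) = if f ∈ s then [f] else [] := by
  induction s with
  | nil => simp
  | cons a t ih =>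
    simp only [List.nodup_cons] at hs
    by_cases h : a = f
    · subst h
      simp [ih hs.2, hs.1]
    · simp [h, ih hs.2, Ne.symm h]

-- B's bucket for f is exactly A's inner scan for f
theorem pv_bucket_gen (l : List (Int × List Int)) (f : Int) :
    ((l.flatMap (fun p => (PySem.Set.ofList p.2).map (fun g => (g, p.1)))).filter
        (fun q => q.1 == f)).map (·.2)
      = (l.filter (fun p => decide (f ∈ p.2))).map (·.1) := by
  induction l with
  | nil => simp
  | cons p t ih =>
    simp only [List.flatMap_cons, List.filter_append, List.map_append, ih,
      List.filter_map, List.filter_cons]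
    have h := pv_filter_beq_of_nodup (PySem.Set.ofList p.2) (PySem.Set.nodup_ofList p.2) f
    by_cases hf : f ∈ p.2
    · simp only [Function.comp_def]
      rw [show (fun (g : Int) => ((g, p.1).1 == f)) = (fun g => g == f) from rfl, h]
      simp [PySem.Set.mem_ofList, hf]
    · simp only [Function.comp_def]
      rw [show (fun (g : Int) => ((g, p.1).1 == f)) = (fun g => g == f) from rfl, h]
      simp [PySem.Set.mem_ofList, hf]

-- a factor occurs among the pairs' keys iff it occurs in some matrix's pair
theorem pv_mem_pairs_fst (factors : List (List Int)) (f : Int) :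
    f ∈ (pvPairs factors).map (·.1) ↔ f ∈ factors.flatten := by
  simp only [pvPairs, List.mem_map, List.mem_flatMap, PySem.Set.mem_ofList,
    List.mem_flatten]
  constructor
  · rintro ⟨q, ⟨p, hp, g, hg, rfl⟩, rfl⟩
    refine ⟨p.2, ?_, hg⟩
    rw [← PySem.List.map_snd_enumerate factors 0]
    exact List.mem_map_of_mem hp
  · rintro ⟨fs, hfs, hf⟩
    have : fs ∈ (PySem.List.enumerate factors 0).map (·.2) := by
      rw [PySem.List.map_snd_enumerate]; exact hfs
    obtain ⟨p, hp, hp2⟩ := List.mem_map.mp this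
    exact ⟨(f, p.1), ⟨p, hp, f, by rw [hp2]; exact hf, rfl⟩, rfl⟩

-- ===== VERDICT (by name: the statement is the Claim_ definition above) =====
theorem get_matrices_spec : Claim_equal_get_matrices := by
  intro factors _
  unfold Spec_get_matrices get_matrices get_matrices_alt get_factor_list
  rw [pv_buckets_eq]
  simp only []
  -- A's outer append-loop is a map over the factor list
  rw [show (factors.foldl (fun acc f => acc ++ f) []) = factors.flatten from
        PySem.List.foldl_append_eq_flatten factors []]
  rw [PySem.List.foldl_append_singleton_eq_map
        (fun f => (PySem.List.enumerate factors 0).foldl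
          (fun ml p => if f ∈ p.2 then ml ++ [p.1] else ml) []) _ []]
  -- B's key list sorts to A's factor list
  have hkeys : (((pvPairs factors).foldl
      (fun d q => d.modify q.1 [] (· ++ [q.2])) PySem.Dict.empty)).keys
      = PySem.Set.ofList ((pvPairs factors).map (·.1)) := by
    rw [PySem.Dict.keys_foldl_modify_key (pvPairs factors) (·.1)]
    simp [PySem.Set.update_nil_left]
  rw [hkeys]
  have hperm : (PySem.Set.ofList ((pvPairs factors).map (·.1))).Perm
      (PySem.Set.ofList factors.flatten) := by
    refine (List.perm_ext_iff_of_nodup (PySem.Set.nodup_ofList _)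
      (PySem.Set.nodup_ofList _)).mpr ?_
    intro a
    simp only [PySem.Set.mem_ofList]
    exact pv_mem_pairs_fst factors a
  rw [(PySem.List.sorted_id_eq_sorted_id_iff_perm _ _).mpr hperm]
  -- pointwise: each emitted bucket equals A's inner scan
  simp only [List.nil_append]
  refine (List.map_congr_left ?_).symm
  intro f _
  rw [PySem.Dict.getD_foldl_modify_append, PySem.Dict.getD_empty, List.nil_append,
    pvPairs, pv_bucket_gen,
    PySem.List.foldl_append_ite (fun p => f ∈ p.2) Prod.fst (PySem.List.enumerate factors 0) []]
  simp
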